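-- pv_equiv track=rewrite | github.com/shah86Dev/hackthonq4 | final_project/src/multilingual_support.py | _adapt_for_urdu_culture
-- ===== SOURCE A (Python) =====
-- def _adapt_for_urdu_culture(content: str) -> str:
--     """Adapt content for Urdu/Pakistani cultural context"""
--     # Replace examples with Pakistani context
--     replacements = {
--         "Silicon Valley": "Pakistani tech hubs",
--         "American university": "Pakistani university",
--         "Boston hospital": "Karachi hospital",
--         "Detroit manufacturing": "Faisalabad manufacturing",
--         "California agriculture": "Punjab agriculture"
--     }
--
--     localized_content = content
--     for old, new in replacements.items():
--         localized_content = localized_content.replace(old, new)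
--
--     return localized_content
-- ===== SOURCE B (Python) =====
-- _REPLACEMENTS = {
--     "Silicon Valley": "Pakistani tech hubs",
--     "American university": "Pakistani university",
--     "Boston hospital": "Karachi hospital",
--     "Detroit manufacturing": "Faisalabad manufacturing",
--     "California agriculture": "Punjab agriculture",
-- }
--
--
-- def _adapt_for_urdu_culture(content: str) -> str:
--     """Adapt content for Urdu/Pakistani cultural context (single left-to-right scan)."""
--     out = []
--     i = 0
--     n = len(content)
--     while i < n:
--         for old, new in _REPLACEMENTS.items():
--             if content.startswith(old, i):
--                 out.append(new)
--                 i += len(old)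
--                 break
--         else:
--             out.append(content[i])
--             i += 1
--     return "".join(out)
-- ===== Notes on version B (the rewrite author's own statement) =====
-- stated objective: alternative
-- what changed: Replaces five independent full-string str.replace passes with a single left-to-right scan that, at each position, matches any of the five keys against the text and substitutes from the lookup table; equivalent because the keys start with distinct letters, never overlap, and no replacement value can create or destroy a match.
import Mathlib
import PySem

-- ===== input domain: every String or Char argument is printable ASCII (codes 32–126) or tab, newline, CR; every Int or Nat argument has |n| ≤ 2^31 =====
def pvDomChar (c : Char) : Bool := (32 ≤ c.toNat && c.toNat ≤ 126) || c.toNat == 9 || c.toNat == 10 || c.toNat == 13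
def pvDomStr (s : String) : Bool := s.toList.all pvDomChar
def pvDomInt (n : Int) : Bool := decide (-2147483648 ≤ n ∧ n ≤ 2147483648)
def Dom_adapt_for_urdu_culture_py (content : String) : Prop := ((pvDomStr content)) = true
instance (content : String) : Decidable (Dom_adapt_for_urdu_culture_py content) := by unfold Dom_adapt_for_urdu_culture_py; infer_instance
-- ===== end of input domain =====

-- B replaces five sequential full-string replace passes with one left-to-right scan over a key table; objective: alternative single-pass structure (return value only).


-- ===== PORT A =====
-- literal transliteration: a dict of replacements, then one full-string replace per entry in insertion order
def adapt_for_urdu_culture_py (content : String) : String :=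
  let replacements : List (String × String) :=
    [("Silicon Valley", "Pakistani tech hubs"),
     ("American university", "Pakistani university"),
     ("Boston hospital", "Karachi hospital"),
     ("Detroit manufacturing", "Faisalabad manufacturing"),
     ("California agriculture", "Punjab agriculture")]
  replacements.foldl (fun localized p => PySem.Str.replace localized p.1 p.2) content

-- ===== PORT B =====
-- B-side helpers: the key/value table as char lists
def pvK1 : List Char := "Silicon Valley".toList
def pvK2 : List Char := "American university".toList
def pvK3 : List Char := "Boston hospital".toList
def pvK4 : List Char := "Detroit manufacturing".toList
def pvK5 : List Char := "California agriculture".toList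
def pvV1 : List Char := "Pakistani tech hubs".toList
def pvV2 : List Char := "Pakistani university".toList
def pvV3 : List Char := "Karachi hospital".toList
def pvV4 : List Char := "Faisalabad manufacturing".toList
def pvV5 : List Char := "Punjab agriculture".toList

def pvTable : List (List Char × List Char) :=
  [(pvK1, pvV1), (pvK2, pvV2), (pvK3, pvV3), (pvK4, pvV4), (pvK5, pvV5)]

-- B's single left-to-right scan: at each position take the first table key that
-- matches, emit its value and skip the key; otherwise copy one character.
-- (the `p.1 ≠ []` conjunct is only a totality guard; every table key is nonempty)
def pvMultiReplace (table : List (List Char × List Char)) (l : List Char) : List Char :=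
  match l with
  | [] => []
  | c :: t =>
    match h : table.find? (fun p => !p.1.isEmpty && p.1.isPrefixOf (c :: t)) with
    | some kv => kv.2 ++ pvMultiReplace table ((c :: t).drop kv.1.length)
    | none => c :: pvMultiReplace table t
termination_by l.length
decreasing_by
  · have h1 := List.find?_some h
    simp only [Bool.and_eq_true, Bool.not_eq_true', List.isEmpty_eq_false_iff] at h1
    have : 1 ≤ kv.1.length := List.length_pos_iff.mpr h1.1
    simp only [List.length_drop, List.length_cons]
    omega
  · simp

def adapt_for_urdu_culture_py_alt (content : String) : String :=
  String.ofList (pvMultiReplace pvTable content.toList)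

-- ===== PRECONDITION & SPEC =====
def Spec_adapt_for_urdu_culture_py (content : String) (out : String) : Prop := out = adapt_for_urdu_culture_py_alt content
instance (content : String) (out : String) : Decidable (Spec_adapt_for_urdu_culture_py content out) := by unfold Spec_adapt_for_urdu_culture_py; infer_instance

-- ===== CLAIM (what is proved, stated in full; the proofs are below) =====
def Claim_equal_adapt_for_urdu_culture_py : Prop := ∀ (content : String), Dom_adapt_for_urdu_culture_py content → Spec_adapt_for_urdu_culture_py content (adapt_for_urdu_culture_py content)

-- ===== LEMMAS AND PROOFS =====

-- clean fuel-free form of PySem.Chars.replace for a nonempty pattern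
def pvRep (old new : List Char) (l : List Char) : List Char :=
  match l with
  | [] => []
  | c :: t =>
    if h : old ≠ [] ∧ old.isPrefixOf (c :: t) then new ++ pvRep old new ((c :: t).drop old.length)
    else c :: pvRep old new t
termination_by l.length
decreasing_by
  · have : 1 ≤ old.length := List.length_pos_iff.mpr h.1
    simp only [List.length_drop, List.length_cons]
    omega
  · simp

theorem pvRep_go (old new : List Char) (hold : old ≠ []) :
    ∀ (fuel : Nat) (l acc : List Char), l.length ≤ fuel →
      PySem.Chars.replace.go old new fuel l acc = acc.reverse ++ pvRep old new l := by
  intro fuel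
  induction fuel with
  | zero =>
    intro l acc hl
    have : l = [] := List.eq_nil_of_length_eq_zero (Nat.le_zero.mp hl)
    subst this
    simp [PySem.Chars.replace.go, pvRep]
  | succ fuel ih =>
    intro l acc hl
    match l with
    | [] => simp [PySem.Chars.replace.go, pvRep]
    | c :: t =>
      rw [PySem.Chars.replace.go]
      by_cases hp : old.isPrefixOf (c :: t)
      · have h1 : 1 ≤ old.length := List.length_pos_iff.mpr hold
        have hdl : ((c :: t).drop old.length).length ≤ fuel := by
          simp only [List.length_drop, List.length_cons]
          simp only [List.length_cons] at hl
          omega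
        rw [if_pos hp, ih _ _ hdl, pvRep]
        rw [dif_pos ⟨hold, hp⟩]
        simp
      · have hdl : t.length ≤ fuel := by
          simp only [List.length_cons] at hl; omega
        rw [if_neg hp, ih _ _ hdl, pvRep]
        rw [dif_neg (by simp [hp])]
        simp

theorem pvReplace_eq_pvRep (old new s : List Char) (hold : old ≠ []) :
    PySem.Chars.replace s old new = pvRep old new s := by
  rw [PySem.Chars.replace]
  rw [if_neg (by simp [hold])]
  simpa using pvRep_go old new hold s.length s [] (le_refl _)

theorem pvRep_nil (old new : List Char) : pvRep old new [] = [] := by rw [pvRep]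

theorem pvRep_cons_neg (old new : List Char) (c : Char) (t : List Char)
    (h : ¬ old <+: (c :: t)) : pvRep old new (c :: t) = c :: pvRep old new t := by
  rw [pvRep, dif_neg]
  intro hc
  exact h (List.isPrefixOf_iff_prefix.mp hc.2)

theorem pvRep_match (o : Char) (os new t : List Char) :
    pvRep (o :: os) new ((o :: os) ++ t) = new ++ pvRep (o :: os) new t := by
  have hd : (o :: (os ++ t)).drop (o :: os).length = t := by
    simpa using List.drop_left (o :: os) t
  rw [List.cons_append, pvRep, dif_pos ⟨by simp, List.isPrefixOf_iff_prefix.mpr (by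
    simpa using (List.prefix_append (o :: os) t))⟩, hd]

theorem pvRep_append (c0 : Char) (ko new : List Char) :
    ∀ (u s : List Char), c0 ∉ u → pvRep (c0 :: ko) new (u ++ s) = u ++ pvRep (c0 :: ko) new s := by
  intro u
  induction u with
  | nil => intro s _; simp
  | cons a u ih =>
    intro s h
    have hne : ¬ (c0 :: ko) <+: (a :: (u ++ s)) := by
      intro hp
      rcases List.cons_prefix_cons.mp hp with ⟨rfl, _⟩
      exact h (List.mem_cons_self ..)
    rw [List.cons_append, pvRep_cons_neg _ _ _ _ hne,
      ih s (fun hm => h (List.mem_cons_of_mem _ hm)), List.cons_append]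

theorem pvRep_prefix_stable (c0 n0 : Char) (ko nv : List Char) :
    ∀ (t w : List Char), n0 ∉ w → w <+: pvRep (c0 :: ko) (n0 :: nv) t → w <+: t := by
  intro t
  induction t with
  | nil =>
    intro w hn hw
    rw [pvRep_nil] at hw
    exact hw
  | cons c t ih =>
    intro w hn hw
    by_cases hp : (c0 :: ko) ≠ [] ∧ (c0 :: ko).isPrefixOf (c :: t)
    · rw [pvRep, dif_pos hp] at hw
      match w, hw with
      | [], _ => exact List.nil_prefix
      | x :: w', hw =>
        rcases List.cons_prefix_cons.mp hw with ⟨rfl, _⟩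
        exact absurd (List.mem_cons_self ..) hn
    · rw [pvRep, dif_neg hp] at hw
      match w, hw with
      | [], _ => exact List.nil_prefix
      | x :: w', hw =>
        rcases List.cons_prefix_cons.mp hw with ⟨rfl, hw'⟩
        exact List.cons_prefix_cons.mpr
          ⟨rfl, ih w' (fun hm => hn (List.mem_cons_of_mem _ hm)) hw'⟩

-- a key that does not match at the head of c :: t still does not match after an
-- inner pass whose replacement value starts with a character the key's tail lacks
theorem pvRep_not_prefix (c c0 n0 x : Char) (ko nv t w : List Char) (hn : n0 ∉ w)
    (h : ¬ (x :: w) <+: (c :: t)) :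
    ¬ (x :: w) <+: (c :: pvRep (c0 :: ko) (n0 :: nv) t) := by
  intro hp
  rcases List.cons_prefix_cons.mp hp with ⟨rfl, hw⟩
  exact h (List.cons_prefix_cons.mpr ⟨rfl, pvRep_prefix_stable c0 n0 ko nv t w hn hw⟩)

theorem pvMultiReplace_cons_some (table : List (List Char × List Char)) (c : Char)
    (t : List Char) (kv : List Char × List Char)
    (h : table.find? (fun p => !p.1.isEmpty && p.1.isPrefixOf (c :: t)) = some kv) :
    pvMultiReplace table (c :: t) = kv.2 ++ pvMultiReplace table ((c :: t).drop kv.1.length) := by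
  rw [pvMultiReplace]
  split <;> simp_all

theorem pvMultiReplace_cons_none (table : List (List Char × List Char)) (c : Char)
    (t : List Char)
    (h : table.find? (fun p => !p.1.isEmpty && p.1.isPrefixOf (c :: t)) = none) :
    pvMultiReplace table (c :: t) = c :: pvMultiReplace table t := by
  rw [pvMultiReplace]
  split <;> simp_all

-- cons-form equalities for the literal keys/values (used to instantiate the lemmas)
theorem pvEK1 : 'S' :: "ilicon Valley".toList = pvK1 := by decide
theorem pvEV1 : 'P' :: "akistani tech hubs".toList = pvV1 := by decide
theorem pvEK2 : 'A' :: "merican university".toList = pvK2 := by decide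
theorem pvEV2 : 'P' :: "akistani university".toList = pvV2 := by decide
theorem pvEK3 : 'B' :: "oston hospital".toList = pvK3 := by decide
theorem pvEV3 : 'K' :: "arachi hospital".toList = pvV3 := by decide
theorem pvEK4 : 'D' :: "etroit manufacturing".toList = pvK4 := by decide
theorem pvEV4 : 'F' :: "aisalabad manufacturing".toList = pvV4 := by decide
theorem pvEK5 : 'C' :: "alifornia agriculture".toList = pvK5 := by decide

theorem pvE1 : pvK1.isEmpty = false := by decide
theorem pvE2 : pvK2.isEmpty = false := by decide
theorem pvE3 : pvK3.isEmpty = false := by decide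
theorem pvE4 : pvK4.isEmpty = false := by decide
theorem pvE5 : pvK5.isEmpty = false := by decide

-- five sequential replace passes coincide with the single scan (fuel induction on length)
theorem pvChainFuel : ∀ (n : Nat) (l : List Char), l.length ≤ n →
    pvRep pvK5 pvV5 (pvRep pvK4 pvV4 (pvRep pvK3 pvV3 (pvRep pvK2 pvV2 (pvRep pvK1 pvV1 l)))) =
      pvMultiReplace pvTable l := by
  intro n
  induction n with
  | zero =>
    intro l hl
    have hnil : l = [] := List.eq_nil_of_length_eq_zero (Nat.le_zero.mp hl)
    subst hnil
    simp [pvRep_nil, pvMultiReplace]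
  | succ n ih =>
    intro l hl
    match l, hl with
    | [], _ => simp [pvRep_nil, pvMultiReplace]
    | c :: t, hl =>
      by_cases h1 : pvK1 <+: (c :: t)
      · obtain ⟨t0, ht⟩ := h1
        have hki : pvK1.length = 14 := by decide
        have hlc := congrArg List.length ht
        simp only [List.length_append, List.length_cons, hki] at hlc
        simp only [List.length_cons] at hl
        have hlt : t0.length ≤ n := by omega
        have bp1 : pvK1.isPrefixOf (c :: t) = true := List.isPrefixOf_iff_prefix.mpr ⟨t0, ht⟩
        have f : pvTable.find? (fun p => !p.1.isEmpty && p.1.isPrefixOf (c :: t)) = some (pvK1, pvV1) := by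
          simp [pvTable, List.find?, bp1, pvE1]
        rw [pvMultiReplace_cons_some _ _ _ _ f]
        have hdrop : (c :: t).drop pvK1.length = t0 := by rw [← ht]; exact List.drop_left
        rw [hdrop, ← ht]
        have p1 : ∀ X, pvRep pvK1 pvV1 (pvK1 ++ X) = pvV1 ++ pvRep pvK1 pvV1 X := by
          intro X; rw [← pvEK1]; exact pvRep_match _ _ _ _
        have p2 : ∀ X, pvRep pvK2 pvV2 (pvV1 ++ X) = pvV1 ++ pvRep pvK2 pvV2 X := by
          intro X; rw [← pvEK2]; exact pvRep_append _ _ _ _ _ (by decide)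
        have p3 : ∀ X, pvRep pvK3 pvV3 (pvV1 ++ X) = pvV1 ++ pvRep pvK3 pvV3 X := by
          intro X; rw [← pvEK3]; exact pvRep_append _ _ _ _ _ (by decide)
        have p4 : ∀ X, pvRep pvK4 pvV4 (pvV1 ++ X) = pvV1 ++ pvRep pvK4 pvV4 X := by
          intro X; rw [← pvEK4]; exact pvRep_append _ _ _ _ _ (by decide)
        have p5 : ∀ X, pvRep pvK5 pvV5 (pvV1 ++ X) = pvV1 ++ pvRep pvK5 pvV5 X := by
          intro X; rw [← pvEK5]; exact pvRep_append _ _ _ _ _ (by decide)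
        rw [p1, p2, p3, p4, p5, ih t0 hlt]
      by_cases h2 : pvK2 <+: (c :: t)
      · obtain ⟨t0, ht⟩ := h2
        have hki : pvK2.length = 19 := by decide
        have hlc := congrArg List.length ht
        simp only [List.length_append, List.length_cons, hki] at hlc
        simp only [List.length_cons] at hl
        have hlt : t0.length ≤ n := by omega
        have bp1 : pvK1.isPrefixOf (c :: t) = false :=
          Bool.eq_false_iff.mpr (fun hb => h1 (List.isPrefixOf_iff_prefix.mp hb))
        have bp2 : pvK2.isPrefixOf (c :: t) = true := List.isPrefixOf_iff_prefix.mpr ⟨t0, ht⟩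
        have f : pvTable.find? (fun p => !p.1.isEmpty && p.1.isPrefixOf (c :: t)) = some (pvK2, pvV2) := by
          simp [pvTable, List.find?, bp1, bp2, pvE1, pvE2]
        rw [pvMultiReplace_cons_some _ _ _ _ f]
        have hdrop : (c :: t).drop pvK2.length = t0 := by rw [← ht]; exact List.drop_left
        rw [hdrop, ← ht]
        have p1 : ∀ X, pvRep pvK1 pvV1 (pvK2 ++ X) = pvK2 ++ pvRep pvK1 pvV1 X := by
          intro X; rw [← pvEK1]; exact pvRep_append _ _ _ _ _ (by decide)
        have p2 : ∀ X, pvRep pvK2 pvV2 (pvK2 ++ X) = pvV2 ++ pvRep pvK2 pvV2 X := by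
          intro X; rw [← pvEK2]; exact pvRep_match _ _ _ _
        have p3 : ∀ X, pvRep pvK3 pvV3 (pvV2 ++ X) = pvV2 ++ pvRep pvK3 pvV3 X := by
          intro X; rw [← pvEK3]; exact pvRep_append _ _ _ _ _ (by decide)
        have p4 : ∀ X, pvRep pvK4 pvV4 (pvV2 ++ X) = pvV2 ++ pvRep pvK4 pvV4 X := by
          intro X; rw [← pvEK4]; exact pvRep_append _ _ _ _ _ (by decide)
        have p5 : ∀ X, pvRep pvK5 pvV5 (pvV2 ++ X) = pvV2 ++ pvRep pvK5 pvV5 X := by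
          intro X; rw [← pvEK5]; exact pvRep_append _ _ _ _ _ (by decide)
        rw [p1, p2, p3, p4, p5, ih t0 hlt]
      by_cases h3 : pvK3 <+: (c :: t)
      · obtain ⟨t0, ht⟩ := h3
        have hki : pvK3.length = 15 := by decide
        have hlc := congrArg List.length ht
        simp only [List.length_append, List.length_cons, hki] at hlc
        simp only [List.length_cons] at hl
        have hlt : t0.length ≤ n := by omega
        have bp1 : pvK1.isPrefixOf (c :: t) = false :=
          Bool.eq_false_iff.mpr (fun hb => h1 (List.isPrefixOf_iff_prefix.mp hb))
        have bp2 : pvK2.isPrefixOf (c :: t) = false :=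
          Bool.eq_false_iff.mpr (fun hb => h2 (List.isPrefixOf_iff_prefix.mp hb))
        have bp3 : pvK3.isPrefixOf (c :: t) = true := List.isPrefixOf_iff_prefix.mpr ⟨t0, ht⟩
        have f : pvTable.find? (fun p => !p.1.isEmpty && p.1.isPrefixOf (c :: t)) = some (pvK3, pvV3) := by
          simp [pvTable, List.find?, bp1, bp2, bp3, pvE1, pvE2, pvE3]
        rw [pvMultiReplace_cons_some _ _ _ _ f]
        have hdrop : (c :: t).drop pvK3.length = t0 := by rw [← ht]; exact List.drop_left
        rw [hdrop, ← ht]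
        have p1 : ∀ X, pvRep pvK1 pvV1 (pvK3 ++ X) = pvK3 ++ pvRep pvK1 pvV1 X := by
          intro X; rw [← pvEK1]; exact pvRep_append _ _ _ _ _ (by decide)
        have p2 : ∀ X, pvRep pvK2 pvV2 (pvK3 ++ X) = pvK3 ++ pvRep pvK2 pvV2 X := by
          intro X; rw [← pvEK2]; exact pvRep_append _ _ _ _ _ (by decide)
        have p3 : ∀ X, pvRep pvK3 pvV3 (pvK3 ++ X) = pvV3 ++ pvRep pvK3 pvV3 X := by
          intro X; rw [← pvEK3]; exact pvRep_match _ _ _ _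
        have p4 : ∀ X, pvRep pvK4 pvV4 (pvV3 ++ X) = pvV3 ++ pvRep pvK4 pvV4 X := by
          intro X; rw [← pvEK4]; exact pvRep_append _ _ _ _ _ (by decide)
        have p5 : ∀ X, pvRep pvK5 pvV5 (pvV3 ++ X) = pvV3 ++ pvRep pvK5 pvV5 X := by
          intro X; rw [← pvEK5]; exact pvRep_append _ _ _ _ _ (by decide)
        rw [p1, p2, p3, p4, p5, ih t0 hlt]
      by_cases h4 : pvK4 <+: (c :: t)
      · obtain ⟨t0, ht⟩ := h4
        have hki : pvK4.length = 21 := by decide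
        have hlc := congrArg List.length ht
        simp only [List.length_append, List.length_cons, hki] at hlc
        simp only [List.length_cons] at hl
        have hlt : t0.length ≤ n := by omega
        have bp1 : pvK1.isPrefixOf (c :: t) = false :=
          Bool.eq_false_iff.mpr (fun hb => h1 (List.isPrefixOf_iff_prefix.mp hb))
        have bp2 : pvK2.isPrefixOf (c :: t) = false :=
          Bool.eq_false_iff.mpr (fun hb => h2 (List.isPrefixOf_iff_prefix.mp hb))
        have bp3 : pvK3.isPrefixOf (c :: t) = false :=
          Bool.eq_false_iff.mpr (fun hb => h3 (List.isPrefixOf_iff_prefix.mp hb))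
        have bp4 : pvK4.isPrefixOf (c :: t) = true := List.isPrefixOf_iff_prefix.mpr ⟨t0, ht⟩
        have f : pvTable.find? (fun p => !p.1.isEmpty && p.1.isPrefixOf (c :: t)) = some (pvK4, pvV4) := by
          simp [pvTable, List.find?, bp1, bp2, bp3, bp4, pvE1, pvE2, pvE3, pvE4]
        rw [pvMultiReplace_cons_some _ _ _ _ f]
        have hdrop : (c :: t).drop pvK4.length = t0 := by rw [← ht]; exact List.drop_left
        rw [hdrop, ← ht]
        have p1 : ∀ X, pvRep pvK1 pvV1 (pvK4 ++ X) = pvK4 ++ pvRep pvK1 pvV1 X := by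
          intro X; rw [← pvEK1]; exact pvRep_append _ _ _ _ _ (by decide)
        have p2 : ∀ X, pvRep pvK2 pvV2 (pvK4 ++ X) = pvK4 ++ pvRep pvK2 pvV2 X := by
          intro X; rw [← pvEK2]; exact pvRep_append _ _ _ _ _ (by decide)
        have p3 : ∀ X, pvRep pvK3 pvV3 (pvK4 ++ X) = pvK4 ++ pvRep pvK3 pvV3 X := by
          intro X; rw [← pvEK3]; exact pvRep_append _ _ _ _ _ (by decide)
        have p4 : ∀ X, pvRep pvK4 pvV4 (pvK4 ++ X) = pvV4 ++ pvRep pvK4 pvV4 X := by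
          intro X; rw [← pvEK4]; exact pvRep_match _ _ _ _
        have p5 : ∀ X, pvRep pvK5 pvV5 (pvV4 ++ X) = pvV4 ++ pvRep pvK5 pvV5 X := by
          intro X; rw [← pvEK5]; exact pvRep_append _ _ _ _ _ (by decide)
        rw [p1, p2, p3, p4, p5, ih t0 hlt]
      by_cases h5 : pvK5 <+: (c :: t)
      · obtain ⟨t0, ht⟩ := h5
        have hki : pvK5.length = 22 := by decide
        have hlc := congrArg List.length ht
        simp only [List.length_append, List.length_cons, hki] at hlc
        simp only [List.length_cons] at hl
        have hlt : t0.length ≤ n := by omega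
        have bp1 : pvK1.isPrefixOf (c :: t) = false :=
          Bool.eq_false_iff.mpr (fun hb => h1 (List.isPrefixOf_iff_prefix.mp hb))
        have bp2 : pvK2.isPrefixOf (c :: t) = false :=
          Bool.eq_false_iff.mpr (fun hb => h2 (List.isPrefixOf_iff_prefix.mp hb))
        have bp3 : pvK3.isPrefixOf (c :: t) = false :=
          Bool.eq_false_iff.mpr (fun hb => h3 (List.isPrefixOf_iff_prefix.mp hb))
        have bp4 : pvK4.isPrefixOf (c :: t) = false :=
          Bool.eq_false_iff.mpr (fun hb => h4 (List.isPrefixOf_iff_prefix.mp hb))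
        have bp5 : pvK5.isPrefixOf (c :: t) = true := List.isPrefixOf_iff_prefix.mpr ⟨t0, ht⟩
        have f : pvTable.find? (fun p => !p.1.isEmpty && p.1.isPrefixOf (c :: t)) = some (pvK5, pvV5) := by
          simp [pvTable, List.find?, bp1, bp2, bp3, bp4, bp5, pvE1, pvE2, pvE3, pvE4, pvE5]
        rw [pvMultiReplace_cons_some _ _ _ _ f]
        have hdrop : (c :: t).drop pvK5.length = t0 := by rw [← ht]; exact List.drop_left
        rw [hdrop, ← ht]
        have p1 : ∀ X, pvRep pvK1 pvV1 (pvK5 ++ X) = pvK5 ++ pvRep pvK1 pvV1 X := by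
          intro X; rw [← pvEK1]; exact pvRep_append _ _ _ _ _ (by decide)
        have p2 : ∀ X, pvRep pvK2 pvV2 (pvK5 ++ X) = pvK5 ++ pvRep pvK2 pvV2 X := by
          intro X; rw [← pvEK2]; exact pvRep_append _ _ _ _ _ (by decide)
        have p3 : ∀ X, pvRep pvK3 pvV3 (pvK5 ++ X) = pvK5 ++ pvRep pvK3 pvV3 X := by
          intro X; rw [← pvEK3]; exact pvRep_append _ _ _ _ _ (by decide)
        have p4 : ∀ X, pvRep pvK4 pvV4 (pvK5 ++ X) = pvK5 ++ pvRep pvK4 pvV4 X := by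
          intro X; rw [← pvEK4]; exact pvRep_append _ _ _ _ _ (by decide)
        have p5 : ∀ X, pvRep pvK5 pvV5 (pvK5 ++ X) = pvV5 ++ pvRep pvK5 pvV5 X := by
          intro X; rw [← pvEK5]; exact pvRep_match _ _ _ _
        rw [p1, p2, p3, p4, p5, ih t0 hlt]
      · -- no key matches at this position: every pass and the scan copy `c`
        have bp1 : pvK1.isPrefixOf (c :: t) = false :=
          Bool.eq_false_iff.mpr (fun hb => h1 (List.isPrefixOf_iff_prefix.mp hb))
        have bp2 : pvK2.isPrefixOf (c :: t) = false :=
          Bool.eq_false_iff.mpr (fun hb => h2 (List.isPrefixOf_iff_prefix.mp hb))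
        have bp3 : pvK3.isPrefixOf (c :: t) = false :=
          Bool.eq_false_iff.mpr (fun hb => h3 (List.isPrefixOf_iff_prefix.mp hb))
        have bp4 : pvK4.isPrefixOf (c :: t) = false :=
          Bool.eq_false_iff.mpr (fun hb => h4 (List.isPrefixOf_iff_prefix.mp hb))
        have bp5 : pvK5.isPrefixOf (c :: t) = false :=
          Bool.eq_false_iff.mpr (fun hb => h5 (List.isPrefixOf_iff_prefix.mp hb))
        have f : pvTable.find? (fun p => !p.1.isEmpty && p.1.isPrefixOf (c :: t)) = none := by
          simp [pvTable, List.find?, bp1, bp2, bp3, bp4, bp5, pvE1, pvE2, pvE3, pvE4, pvE5]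
        rw [pvMultiReplace_cons_none _ _ _ f]
        have q1 : pvRep pvK1 pvV1 (c :: t) = c :: pvRep pvK1 pvV1 t := pvRep_cons_neg _ _ _ _ h1
        have hc2 : ¬ ('A' :: "merican university".toList) <+: (c :: t) := by rw [pvEK2]; exact h2
        have n2_1 := pvRep_not_prefix c 'S' 'P' 'A'
          "ilicon Valley".toList "akistani tech hubs".toList (t) "merican university".toList (by decide) hc2
        rw [pvEK1, pvEV1] at n2_1
        rw [pvEK2] at n2_1
        have q2 : pvRep pvK2 pvV2 (c :: pvRep pvK1 pvV1 (t)) = c :: pvRep pvK2 pvV2 (pvRep pvK1 pvV1 (t)) := pvRep_cons_neg _ _ _ _ n2_1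
        have hc3 : ¬ ('B' :: "oston hospital".toList) <+: (c :: t) := by rw [pvEK3]; exact h3
        have n3_1 := pvRep_not_prefix c 'S' 'P' 'B'
          "ilicon Valley".toList "akistani tech hubs".toList (t) "oston hospital".toList (by decide) hc3
        rw [pvEK1, pvEV1] at n3_1
        have n3_2 := pvRep_not_prefix c 'A' 'P' 'B'
          "merican university".toList "akistani university".toList (pvRep pvK1 pvV1 (t)) "oston hospital".toList (by decide) n3_1
        rw [pvEK2, pvEV2] at n3_2
        rw [pvEK3] at n3_2
        have q3 : pvRep pvK3 pvV3 (c :: pvRep pvK2 pvV2 (pvRep pvK1 pvV1 (t))) = c :: pvRep pvK3 pvV3 (pvRep pvK2 pvV2 (pvRep pvK1 pvV1 (t))) := pvRep_cons_neg _ _ _ _ n3_2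
        have hc4 : ¬ ('D' :: "etroit manufacturing".toList) <+: (c :: t) := by rw [pvEK4]; exact h4
        have n4_1 := pvRep_not_prefix c 'S' 'P' 'D'
          "ilicon Valley".toList "akistani tech hubs".toList (t) "etroit manufacturing".toList (by decide) hc4
        rw [pvEK1, pvEV1] at n4_1
        have n4_2 := pvRep_not_prefix c 'A' 'P' 'D'
          "merican university".toList "akistani university".toList (pvRep pvK1 pvV1 (t)) "etroit manufacturing".toList (by decide) n4_1
        rw [pvEK2, pvEV2] at n4_2
        have n4_3 := pvRep_not_prefix c 'B' 'K' 'D'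
          "oston hospital".toList "arachi hospital".toList (pvRep pvK2 pvV2 (pvRep pvK1 pvV1 (t))) "etroit manufacturing".toList (by decide) n4_2
        rw [pvEK3, pvEV3] at n4_3
        rw [pvEK4] at n4_3
        have q4 : pvRep pvK4 pvV4 (c :: pvRep pvK3 pvV3 (pvRep pvK2 pvV2 (pvRep pvK1 pvV1 (t)))) = c :: pvRep pvK4 pvV4 (pvRep pvK3 pvV3 (pvRep pvK2 pvV2 (pvRep pvK1 pvV1 (t)))) := pvRep_cons_neg _ _ _ _ n4_3
        have hc5 : ¬ ('C' :: "alifornia agriculture".toList) <+: (c :: t) := by rw [pvEK5]; exact h5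
        have n5_1 := pvRep_not_prefix c 'S' 'P' 'C'
          "ilicon Valley".toList "akistani tech hubs".toList (t) "alifornia agriculture".toList (by decide) hc5
        rw [pvEK1, pvEV1] at n5_1
        have n5_2 := pvRep_not_prefix c 'A' 'P' 'C'
          "merican university".toList "akistani university".toList (pvRep pvK1 pvV1 (t)) "alifornia agriculture".toList (by decide) n5_1
        rw [pvEK2, pvEV2] at n5_2
        have n5_3 := pvRep_not_prefix c 'B' 'K' 'C'
          "oston hospital".toList "arachi hospital".toList (pvRep pvK2 pvV2 (pvRep pvK1 pvV1 (t))) "alifornia agriculture".toList (by decide) n5_2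
        rw [pvEK3, pvEV3] at n5_3
        have n5_4 := pvRep_not_prefix c 'D' 'F' 'C'
          "etroit manufacturing".toList "aisalabad manufacturing".toList (pvRep pvK3 pvV3 (pvRep pvK2 pvV2 (pvRep pvK1 pvV1 (t)))) "alifornia agriculture".toList (by decide) n5_3
        rw [pvEK4, pvEV4] at n5_4
        rw [pvEK5] at n5_4
        have q5 : pvRep pvK5 pvV5 (c :: pvRep pvK4 pvV4 (pvRep pvK3 pvV3 (pvRep pvK2 pvV2 (pvRep pvK1 pvV1 (t))))) = c :: pvRep pvK5 pvV5 (pvRep pvK4 pvV4 (pvRep pvK3 pvV3 (pvRep pvK2 pvV2 (pvRep pvK1 pvV1 (t))))) := pvRep_cons_neg _ _ _ _ n5_4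
        have hlt : t.length ≤ n := by simp only [List.length_cons] at hl; omega
        rw [q1, q2, q3, q4, q5, ih t hlt]

theorem adapt_for_urdu_culture_py_spec : Claim_equal_adapt_for_urdu_culture_py := by
  intro content _
  unfold Spec_adapt_for_urdu_culture_py adapt_for_urdu_culture_py adapt_for_urdu_culture_py_alt
  simp only [List.foldl_cons, List.foldl_nil]
  apply String.toList_inj.mp
  simp only [PySem.Str.replace, String.toList_ofList]
  rw [pvReplace_eq_pvRep _ _ _ (by decide), pvReplace_eq_pvRep _ _ _ (by decide),
    pvReplace_eq_pvRep _ _ _ (by decide), pvReplace_eq_pvRep _ _ _ (by decide),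
    pvReplace_eq_pvRep _ _ _ (by decide)]
  exact pvChainFuel content.toList.length content.toList (le_refl _)
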